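-- pv_equiv track=rewrite | github.com/LorenzoTarricone/Probabilistic_Artificial_Intelligence | tasks/task3/solution.py | find_extremes_above_reference
-- ===== SOURCE A (Python) =====
-- def find_extremes_above_reference(data, reference):
--     below_reference = False
--     intervals = []
--
--     for i, value in enumerate(data):
--         if value > reference:
--             if not below_reference:
--                 below_reference = True
--                 start_index = i
--         else:
--             if below_reference:
--                 below_reference = False
--                 end_index = i - 1
--                 intervals.append((start_index, end_index))
--
--     # Check if the last interval extends to the end of the list
--     if below_reference:
--         intervals.append((start_index, len(data) - 1))
--
--     return intervals
-- ===== SOURCE B (Python) =====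
-- def find_extremes_above_reference(data, reference):
--     # Span-based scan: find each maximal run of equal (value > reference) key
--     # with an inner scan, emit the run's bounds when the key is True.
--     intervals = []
--     n = len(data)
--     i = 0
--     while i < n:
--         key = data[i] > reference
--         j = i + 1
--         while j < n and (data[j] > reference) == key:
--             j += 1
--         if key:
--             intervals.append((i, j - 1))
--         i = j
--     return intervals
-- ===== Notes on version B (the rewrite author's own statement) =====
-- stated objective: alternative
-- what changed: Replaced A's one-pass state machine (below_reference flag, start_index, trailing fix-up) with a nested span scan: an outer loop that, for each maximal run of equal (value > reference) key, uses an inner scan to find the run's end and emits (start, end) directly when the key is True, needing no carried flag or tail check.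
import Mathlib
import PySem

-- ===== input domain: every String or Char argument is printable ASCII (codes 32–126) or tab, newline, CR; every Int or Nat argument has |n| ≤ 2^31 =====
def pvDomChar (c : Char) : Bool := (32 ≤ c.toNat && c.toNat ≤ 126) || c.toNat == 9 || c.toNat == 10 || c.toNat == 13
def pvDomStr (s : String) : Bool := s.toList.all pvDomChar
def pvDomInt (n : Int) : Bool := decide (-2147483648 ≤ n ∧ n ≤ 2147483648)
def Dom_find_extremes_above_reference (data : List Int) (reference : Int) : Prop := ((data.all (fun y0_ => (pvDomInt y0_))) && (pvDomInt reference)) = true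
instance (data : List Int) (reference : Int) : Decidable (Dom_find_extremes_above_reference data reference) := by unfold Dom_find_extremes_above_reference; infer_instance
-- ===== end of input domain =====

-- B replaces A's boolean state flag with a span-based scan (inner loop finds each
-- maximal run of equal (value > reference) key); alternative decomposition, same O(n) cost.

-- ===== PORT A =====
-- the enumerate loop of A, carrying (i, below_reference, start_index, intervals);
-- start is initialised to 0 in the port but, as in Python, only read after being set
def aLoop (reference : Int) (xs : List Int) (i : Int) (below : Bool) (start : Int)
    (intervals : List (Int × Int)) : Bool × Int × List (Int × Int) :=
  match xs with
  | [] => (below, start, intervals)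
  | v :: rest =>
    if v > reference then
      if !below then aLoop reference rest (i+1) true i intervals
      else aLoop reference rest (i+1) below start intervals
    else
      if below then aLoop reference rest (i+1) false start (intervals ++ [(start, i-1)])
      else aLoop reference rest (i+1) below start intervals

def find_extremes_above_reference (data : List Int) (reference : Int) : List (Int × Int) :=
  let st := aLoop reference data 0 false 0 []
  if st.1 then st.2.2 ++ [(st.2.1, (data.length : Int) - 1)] else st.2.2

-- ===== PORT B =====
-- inner while loop: advance j while j < n and (data[j] > reference) == key.
-- data[j] is always in range here (0 <= j < len), so getD is exact for Python's data[j].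
-- fuel = number of remaining loop steps possible (the while loop advances j by 1 each
-- step and stops at n, so data.length - j steps always suffice); purely a totality device.
def bScan (data : List Int) (reference : Int) (key : Bool) : Nat → Nat → Nat
  | 0, j => j
  | fuel + 1, j =>
    if j < data.length then
      if decide (data.getD j 0 > reference) == key then bScan data reference key fuel (j+1)
      else j
    else j

-- outer while loop over run starts; fuel totality device as above (i advances by ≥ 1)
def bOuter (data : List Int) (reference : Int) : Nat → Nat → List (Int × Int) → List (Int × Int)
  | 0, _, intervals => intervals
  | fuel + 1, i, intervals =>
    if i < data.length then
      let key := decide (data.getD i 0 > reference)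
      let j := bScan data reference key (data.length - (i+1)) (i+1)
      bOuter data reference fuel j
        (if key then intervals ++ [((i : Int), (j : Int) - 1)] else intervals)
    else intervals

def find_extremes_above_reference_alt (data : List Int) (reference : Int) : List (Int × Int) :=
  bOuter data reference data.length 0 []

-- ===== PRECONDITION & SPEC =====
def Spec_find_extremes_above_reference (data : List Int) (reference : Int) (out : List (Int × Int)) : Prop := out = find_extremes_above_reference_alt data reference
instance (data : List Int) (reference : Int) (out : List (Int × Int)) : Decidable (Spec_find_extremes_above_reference data reference out) := by unfold Spec_find_extremes_above_reference; infer_instance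

-- ===== CLAIM (what is proved, stated in full; the proofs are below) =====
def Claim_equal_find_extremes_above_reference : Prop := ∀ (data : List Int) (reference : Int), Dom_find_extremes_above_reference data reference → Spec_find_extremes_above_reference data reference (find_extremes_above_reference data reference)

-- ===== LEMMAS AND PROOFS =====

-- length of the run of elements whose key equals `key` at the front of xs
def runLength (reference : Int) (xs : List Int) (key : Bool) : Nat :=
  match xs with
  | [] => 0
  | v :: tl => if decide (v > reference) == key then runLength reference tl key + 1 else 0

theorem runLength_cons_self (reference v : Int) (tl : List Int) :
    runLength reference (v :: tl) (decide (v > reference))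
      = runLength reference tl (decide (v > reference)) + 1 := by
  simp [runLength]

-- list-structural rendering of B's outer loop (proof device bridging aLoop and bOuter)
def bLoop (reference : Int) (rest : List Int) (i : Int) (intervals : List (Int × Int)) :
    List (Int × Int) :=
  match rest with
  | [] => intervals
  | v :: tl =>
    bLoop reference ((v :: tl).drop (runLength reference (v :: tl) (decide (v > reference))))
      (i + (runLength reference (v :: tl) (decide (v > reference)) : Int))
      (if v > reference then
         intervals ++ [(i, i + (runLength reference (v :: tl) (decide (v > reference)) : Int) - 1)]
       else intervals)
termination_by rest.length
decreasing_by
  rw [runLength_cons_self]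
  simp

-- A's final fix-up
def finishA (st : Bool × Int × List (Int × Int)) (e : Int) : List (Int × Int) :=
  if st.1 then st.2.2 ++ [(st.2.1, e - 1)] else st.2.2

-- bLoop while inside an above-run that started at absolute index s
def bRun (reference : Int) (xs : List Int) (i s : Int) (acc : List (Int × Int)) :
    List (Int × Int) :=
  match xs with
  | [] => acc ++ [(s, i - 1)]
  | v :: tl =>
    if v > reference then bRun reference tl (i+1) s acc
    else bLoop reference (v :: tl) i (acc ++ [(s, i - 1)])

theorem bRun_eq (reference : Int) (xs : List Int) : ∀ (i s : Int) (acc : List (Int × Int)),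
    bRun reference xs i s acc
      = bLoop reference (xs.drop (runLength reference xs true))
          (i + (runLength reference xs true : Int))
          (acc ++ [(s, i + (runLength reference xs true : Int) - 1)]) := by
  induction xs with
  | nil => intro i s acc; simp [bRun, runLength, bLoop]
  | cons v tl ih =>
    intro i s acc
    by_cases hv : v > reference
    · have hk : runLength reference (v :: tl) true = runLength reference tl true + 1 := by
        simp [runLength, hv]
      rw [show bRun reference (v :: tl) i s acc = bRun reference tl (i+1) s acc from by
        simp [bRun, hv]]
      rw [ih (i+1) s acc, hk]
      have h1 : i + 1 + (runLength reference tl true : Int)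
          = i + ((runLength reference tl true + 1 : Nat) : Int) := by push_cast; ring
      simp only [List.drop_succ_cons, h1]
    · have hk : runLength reference (v :: tl) true = 0 := by
        simp [runLength, hv]
      rw [hk]
      simp [bRun, hv]

theorem bLoop_cons_false (reference v : Int) (tl : List Int) (i : Int)
    (acc : List (Int × Int)) (hv : ¬ v > reference) :
    bLoop reference (v :: tl) i acc = bLoop reference tl (i+1) acc := by
  have hkey : decide (v > reference) = false := by simp [hv]
  have hk : runLength reference (v :: tl) (decide (v > reference))
      = runLength reference tl false + 1 := by
    rw [runLength_cons_self, hkey]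
  rw [bLoop, hk, if_neg hv]
  have hdrop : (v :: tl).drop (runLength reference tl false + 1)
      = tl.drop (runLength reference tl false) := by simp
  rw [hdrop]
  have hi : i + ((runLength reference tl false + 1 : Nat) : Int)
      = (i + 1) + (runLength reference tl false : Int) := by push_cast; ring
  rw [hi]
  -- now show bLoop tl (i+1) acc takes the same shape
  cases tl with
  | nil => simp [runLength, bLoop]
  | cons w tw =>
    by_cases hw : w > reference
    · have : runLength reference (w :: tw) false = 0 := by simp [runLength, hw]
      rw [this]
      simp
    · have hkey' : decide (w > reference) = false := by simp [hw]
      conv_rhs => rw [bLoop]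
      rw [if_neg hw, hkey']

theorem aLoop_eq (reference : Int) (xs : List Int) :
    (∀ (i s0 : Int) (acc : List (Int × Int)),
      finishA (aLoop reference xs i false s0 acc) (i + (xs.length : Int))
        = bLoop reference xs i acc)
    ∧ (∀ (i s : Int) (acc : List (Int × Int)),
      finishA (aLoop reference xs i true s acc) (i + (xs.length : Int))
        = bRun reference xs i s acc) := by
  induction xs with
  | nil =>
    constructor
    · intro i s0 acc; simp [aLoop, finishA, bLoop]
    · intro i s acc; simp [aLoop, finishA, bRun]
  | cons v tl ih =>
    have hlen : ∀ i : Int, i + ((v :: tl).length : Int) = (i + 1) + (tl.length : Int) := by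
      intro i; simp; ring
    constructor
    · intro i s0 acc
      by_cases hv : v > reference
      · rw [show aLoop reference (v :: tl) i false s0 acc
              = aLoop reference tl (i+1) true i acc from by simp [aLoop, hv]]
        rw [hlen, ih.2 (i+1) i acc, bRun_eq]
        have hk : runLength reference (v :: tl) (decide (v > reference))
            = runLength reference tl true + 1 := by
          rw [runLength_cons_self]; simp [hv]
        conv_rhs => rw [bLoop]
        rw [hk, if_pos hv]
        have h1 : i + ((runLength reference tl true + 1 : Nat) : Int)
            = i + 1 + (runLength reference tl true : Int) := by push_cast; ring
        simp only [List.drop_succ_cons, h1]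
      · rw [show aLoop reference (v :: tl) i false s0 acc
              = aLoop reference tl (i+1) false s0 acc from by simp [aLoop, hv]]
        rw [hlen, ih.1 (i+1) s0 acc, bLoop_cons_false reference v tl i acc hv]
    · intro i s acc
      by_cases hv : v > reference
      · rw [show aLoop reference (v :: tl) i true s acc
              = aLoop reference tl (i+1) true s acc from by simp [aLoop, hv]]
        rw [hlen, ih.2 (i+1) s acc]
        simp [bRun, hv]
      · rw [show aLoop reference (v :: tl) i true s acc
              = aLoop reference tl (i+1) false s (acc ++ [(s, i-1)]) from by simp [aLoop, hv]]
        rw [hlen, ih.1 (i+1) s (acc ++ [(s, i-1)])]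
        rw [show bRun reference (v :: tl) i s acc
              = bLoop reference (v :: tl) i (acc ++ [(s, i-1)]) from by simp [bRun, hv]]
        rw [bLoop_cons_false reference v tl i _ hv]

theorem bScan_eq (data : List Int) (reference : Int) (key : Bool) :
    ∀ (fuel j : Nat), data.length ≤ j + fuel →
      bScan data reference key fuel j = j + runLength reference (data.drop j) key := by
  intro fuel
  induction fuel with
  | zero =>
    intro j hj
    rw [List.drop_of_length_le (by omega)]
    simp [bScan, runLength]
  | succ fuel ih =>
    intro j hj
    by_cases h : j < data.length
    · rw [List.drop_eq_getElem_cons h]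
      have hgd : data.getD j 0 = data[j] := List.getD_eq_getElem data 0 h
      by_cases hc : decide (data[j] > reference) == key
      · rw [show bScan data reference key (fuel+1) j = bScan data reference key fuel (j+1) from by
          simp [bScan, h, hc]]
        rw [ih (j+1) (by omega)]
        have hr : runLength reference (data[j] :: data.drop (j+1)) key
            = runLength reference (data.drop (j+1)) key + 1 := by
          simp only [runLength]
          rw [if_pos hc]
        rw [hr]; omega
      · have hc' : ¬ decide (reference < data[j]) = key := by simpa using hc
        rw [show bScan data reference key (fuel+1) j = j from by
          simp [bScan, h]
          intro hh; exact absurd hh hc']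
        have hr : runLength reference (data[j] :: data.drop (j+1)) key = 0 := by
          simp only [runLength]
          rw [if_neg hc]
        omega
    · rw [List.drop_of_length_le (by omega)]
      simp [bScan, h, runLength]

theorem bOuter_eq (data : List Int) (reference : Int) :
    ∀ (fuel i : Nat) (acc : List (Int × Int)), data.length ≤ i + fuel →
      bOuter data reference fuel i acc = bLoop reference (data.drop i) (i : Int) acc := by
  intro fuel
  induction fuel with
  | zero =>
    intro i acc hi
    rw [List.drop_of_length_le (by omega)]
    simp [bOuter, bLoop]
  | succ fuel ih =>
    intro i acc hi
    by_cases h : i < data.length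
    · rw [show bOuter data reference (fuel+1) i acc
          = bOuter data reference fuel
              (bScan data reference (decide (data.getD i 0 > reference)) (data.length - (i+1)) (i+1))
              (if decide (data.getD i 0 > reference) then
                 acc ++ [((i : Int), ((bScan data reference (decide (data.getD i 0 > reference)) (data.length - (i+1)) (i+1) : Nat) : Int) - 1)]
               else acc) from by
        simp [bOuter, h]]
      have hgd : data.getD i 0 = data[i] := List.getD_eq_getElem data 0 h
      rw [bScan_eq data reference _ (data.length - (i+1)) (i+1) (by omega)]
      rw [ih _ _ (by omega)]
      conv_rhs => rw [List.drop_eq_getElem_cons h, bLoop]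
      rw [hgd]
      have hk : runLength reference (data[i] :: data.drop (i+1)) (decide (data[i] > reference))
          = runLength reference (data.drop (i+1)) (decide (data[i] > reference)) + 1 :=
        runLength_cons_self reference data[i] (data.drop (i+1))
      rw [hk]
      have hdrop : (data[i] :: data.drop (i+1)).drop
          (runLength reference (data.drop (i+1)) (decide (data[i] > reference)) + 1)
          = data.drop ((i + 1) + runLength reference (data.drop (i+1)) (decide (data[i] > reference))) := by
        simp [List.drop_drop]; ring_nf
      rw [hdrop]
      have hcast : ((i : Int)) + ((runLength reference (data.drop (i+1)) (decide (data[i] > reference)) + 1 : Nat) : Int)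
          = (((i + 1) + runLength reference (data.drop (i+1)) (decide (data[i] > reference)) : Nat) : Int) := by
        push_cast; ring
      rw [hcast]
      congr 1
      simp
    · rw [List.drop_of_length_le (by omega)]
      simp [bOuter, h, bLoop]

-- ===== VERDICT (by name: the statement is the Claim_ definition above) =====
theorem find_extremes_above_reference_spec : Claim_equal_find_extremes_above_reference := by
  intro data reference _
  unfold Spec_find_extremes_above_reference find_extremes_above_reference
    find_extremes_above_reference_alt
  have h := (aLoop_eq reference data).1 0 0 []
  simp only [zero_add] at h
  rw [bOuter_eq data reference data.length 0 [] (by omega)]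
  simp only [List.drop_zero, Nat.cast_zero]
  rw [← h]
  simp [finishA]
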